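-- pv_equiv track=rewrite | github.com/NPaes12/sfl-serials | sflserial/test.py | convert_serial_to_int
-- ===== SOURCE A (Python) =====
-- import string
--
-- def valid_chars():
--     """Return a list of characters which can be used in this serial number schema:
--
--     - Allow uppercase alphanumeric characters
--     - Exclude '0' and 'O' characters
--
--     This list of characters also specifies the 'increment' order
--     """
--
--     allowed = string.digits + string.ascii_uppercase
--
--     # The following characters are explicitly disallowed in the schema
--     disallowed = 'O0'
--
--     for c in disallowed:
--         idx = allowed.index(c)
--         allowed = allowed[:idx] + allowed[idx + 1:]
--
--     return allowed
--
-- def convert_serial_to_int(serial):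
--     """Convert a serial number (string) to an integer representation.
--     Iterate through each character, and if we find a "weird" character, simply return None
--     """
--
--     num = 0
--
--     valid = valid_chars()
--     N = len(valid)
--
--     # Reverse iterate through the serial number string
--     for idx, c in enumerate(serial[::-1]):
--         if c not in valid:
--             # An invalid character, not sure how to continue
--             # Also, should not ever get here due to validate_serial_number routine
--             return None
--
--         c_int = valid.index(c) + 1
--         c_int *= (N ** idx)
--
--         num += c_int
--     #num = int(serial, base=16)
--
--     return num
-- ===== SOURCE B (Python) =====
-- import string
--
--
-- def convert_serial_to_int(serial):
--     """Dict-indexed staged pipeline: build a char->value table once, map the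
--     serial to digit values, bail if any lookup failed, then Horner-fold."""
--     valid = [c for c in string.digits + string.ascii_uppercase if c not in 'O0']
--     N = len(valid)
--     table = {c: i + 1 for i, c in enumerate(valid)}
--     digits = [table.get(c) for c in serial]
--     if None in digits:
--         return None
--     num = 0
--     for d in digits:
--         num = num * N + d
--     return num
-- ===== Notes on version B (the rewrite author's own statement) =====
-- stated objective: alternative
-- what changed: Replaced the reversed single loop with per-position N**idx powers and a linear valid.index scan by a staged pipeline: a char->value dict built once replaces the index scan, the serial is mapped to digit values, checked for failures, then combined by a forward Horner fold without exponentiation.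
import Mathlib
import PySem

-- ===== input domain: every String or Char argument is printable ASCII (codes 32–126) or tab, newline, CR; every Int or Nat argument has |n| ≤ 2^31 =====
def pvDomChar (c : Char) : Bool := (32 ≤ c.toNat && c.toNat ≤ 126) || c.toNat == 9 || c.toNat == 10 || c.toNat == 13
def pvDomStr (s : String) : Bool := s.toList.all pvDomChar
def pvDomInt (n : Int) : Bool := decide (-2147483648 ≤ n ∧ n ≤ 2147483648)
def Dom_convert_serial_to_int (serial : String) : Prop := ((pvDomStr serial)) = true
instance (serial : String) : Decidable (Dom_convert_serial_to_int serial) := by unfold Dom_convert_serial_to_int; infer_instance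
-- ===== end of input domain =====

-- B replaces A's reversed loop (N**idx powers, valid.index scan) with a staged pipeline:
-- a char->value table built once, a map over the serial, a failure check, and a Horner fold.

-- ===== PORT A =====
-- valid_chars(): digits + uppercase, with 'O' and '0' removed by index/slice, as the Python does
def valid_chars : List Char :=
  "O0".toList.foldl
    (fun allowed c =>
      let idx := PySem.Chars.find allowed [c]  -- allowed.index(c); both chars are present, so find = index
      PySem.List.slice allowed none (some idx) ++ PySem.List.slice allowed (some (idx + 1)) none)
    ("0123456789ABCDEFGHIJKLMNOPQRSTUVWXYZ".toList)

-- the reversed enumerate loop of A, carrying idx and num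
def convLoopA (valid : List Char) (N : Int) : List Char → Nat → Int → Option Int
  | [], _, num => some num
  | c :: rest, idx, num =>
    if c ∈ valid then
      convLoopA valid N rest (idx + 1) (num + ((valid.idxOf c : Int) + 1) * N ^ idx)
    else none

def convert_serial_to_int (serial : String) : Option Int :=
  let valid := valid_chars
  let N : Int := valid.length
  convLoopA valid N serial.toList.reverse 0 0

-- ===== PORT B =====
-- [c for c in string.digits + string.ascii_uppercase if c not in 'O0']
def valid_alt : List Char :=
  ("0123456789ABCDEFGHIJKLMNOPQRSTUVWXYZ".toList).filter (fun c => !(c == 'O' || c == '0'))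

-- {c: i+1 for i, c in enumerate(valid)} — keys are distinct, so the dict is this assoc list in order
def buildTable : List Char → Int → List (Char × Int)
  | [], _ => []
  | c :: rest, i => (c, i + 1) :: buildTable rest (i + 1)

-- table.get(c): first-match association lookup, None when absent
def tget : List (Char × Int) → Char → Option Int
  | [], _ => none
  | (k, v) :: rest, c => if k == c then some v else tget rest c

def convert_serial_to_int_alt (serial : String) : Option Int :=
  let valid := valid_alt
  let N : Int := valid.length
  let table := buildTable valid 0
  let digits := serial.toList.map (tget table)
  if none ∈ digits then none
  else some ((digits.filterMap id).foldl (fun num d => num * N + d) 0)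

-- ===== PRECONDITION & SPEC =====
def Spec_convert_serial_to_int (serial : String) (out : Option Int) : Prop := out = convert_serial_to_int_alt serial
instance (serial : String) (out : Option Int) : Decidable (Spec_convert_serial_to_int serial out) := by unfold Spec_convert_serial_to_int; infer_instance

-- ===== CLAIM (what is proved, stated in full; the proofs are below) =====
def Claim_equal_convert_serial_to_int : Prop := ∀ (serial : String), Dom_convert_serial_to_int serial → Spec_convert_serial_to_int serial (convert_serial_to_int serial)

-- ===== LEMMAS AND PROOFS =====

-- the two helper alphabets coincide
theorem valid_alt_eq : valid_alt = valid_chars := by decide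

-- lookup in the built table is 1 + first index when present, none otherwise
theorem tget_buildTable (l : List Char) (c : Char) (i : Int) :
    tget (buildTable l i) c
      = if c ∈ l then some (i + (l.idxOf c : Int) + 1) else none := by
  induction l generalizing i with
  | nil => simp [buildTable, tget]
  | cons a rest ih =>
    by_cases h : a = c
    · simp [buildTable, tget, h, List.idxOf_cons_self]
    · have hne : ¬ c = a := fun hc => h hc.symm
      simp only [buildTable, tget, beq_iff_eq, h, if_false, ih, List.mem_cons]
      by_cases hm : c ∈ rest
      · simp [hm, hne, h]
        ring
      · simp [hm, hne]

theorem convLoopA_append (valid : List Char) (N : Int) (xs ys : List Char) (idx : Nat) (num : Int) :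
    convLoopA valid N (xs ++ ys) idx num
      = (convLoopA valid N xs idx num).bind (fun n => convLoopA valid N ys (idx + xs.length) n) := by
  induction xs generalizing idx num with
  | nil => simp [convLoopA]
  | cons c rest ih =>
    simp only [List.cons_append, convLoopA]
    split_ifs with h
    · rw [ih]
      have h' : idx + 1 + rest.length = idx + (rest.length + 1) := by omega
      simp [h']
    · simp

-- B's staged pipeline (map, failure check, Horner fold with accumulator) against A's reversed power loop
theorem stages_eq (valid : List Char) (N : Int) (l : List Char) (acc : Int) :
    (if none ∈ l.map (tget (buildTable valid 0)) then none
     else some (((l.map (tget (buildTable valid 0))).filterMap id).foldl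
                  (fun num d => num * N + d) acc))
      = (convLoopA valid N l.reverse 0 0).map (fun s => acc * N ^ l.length + s) := by
  induction l generalizing acc with
  | nil => simp [convLoopA]
  | cons c rest ih =>
    simp only [List.reverse_cons, convLoopA_append, List.map_cons, List.mem_cons,
      tget_buildTable]
    by_cases h : c ∈ valid
    · have hcond : ¬ (none = some ((0 : Int) + (valid.idxOf c : Int) + 1)) := by simp
      simp only [h, if_pos, hcond, false_or, List.filterMap_cons, id, List.foldl_cons]
      by_cases hn : none ∈ rest.map (tget (buildTable valid 0))
      · have h0 := ih (0 : Int)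
        simp only [hn, if_true] at h0 ⊢
        cases hA : convLoopA valid N rest.reverse 0 0 with
        | none => simp
        | some s => rw [hA] at h0; simp at h0
      · have hih := ih (acc * N + ((0 : Int) + (valid.idxOf c : Int) + 1))
        simp only [hn, if_false] at hih ⊢
        cases hA : convLoopA valid N rest.reverse 0 0 with
        | none => rw [hA] at hih; simp at hih
        | some s =>
          rw [hA] at hih
          simp only [Option.map_some, Option.some.injEq, id] at hih
          rw [hih]
          simp only [Option.map_some, Option.bind_some, convLoopA, h, if_pos,
            List.length_cons, List.length_reverse, Nat.zero_add, Option.some.injEq]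
          ring
    · simp only [h, if_false]
      cases hA : convLoopA valid N rest.reverse 0 0 with
      | none => simp
      | some s => simp [convLoopA, h]

-- ===== VERDICT (by name: the statement is the Claim_ definition above) =====
theorem convert_serial_to_int_spec : Claim_equal_convert_serial_to_int := by
  intro serial _
  unfold Spec_convert_serial_to_int convert_serial_to_int convert_serial_to_int_alt
  rw [valid_alt_eq, stages_eq]
  cases convLoopA valid_chars (valid_chars.length) serial.toList.reverse 0 0 with
  | none => simp
  | some s => simp
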